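-- pv_equiv track=rewrite | github.com/justfreddev/pyru | prototype.py | scan_num
-- ===== SOURCE A (Python) =====
-- def scan_num(source, curr):
--     """Scans the source code for a number and returns the index of the last digit"""
--     while curr < len(source) - 1:
--         if source[curr + 1] in ['0', '1', '2', '3', '4', '5', '6', '7', '8', '9']:
--             curr += 1
--         else:
--             break
--
--     if curr < len(source) - 1:
--         if source[curr + 1] == '.':
--             curr += 1
--
--             while curr < len(source) - 1:
--                 if source[curr + 1] in ['0', '1', '2', '3', '4', '5', '6', '7', '8', '9']:
--                     curr += 1
--                 elif source[curr + 1] == '.':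
--                     raise ValueError("Number has two decimal points")
--                 else:
--                     return curr
--
--     return curr
-- ===== SOURCE B (Python) =====
-- def scan_num(source, curr):
--     """Scans the source code for a number and returns the index of the last digit"""
--     seen_dot = False
--     while curr < len(source) - 1:
--         nxt = source[curr + 1]
--         if nxt in '0123456789':
--             curr += 1
--         elif nxt == '.' and not seen_dot:
--             seen_dot = True
--             curr += 1
--         elif nxt == '.':
--             raise ValueError("Number has two decimal points")
--         else:
--             break
--     return curr
-- ===== Notes on version B (the rewrite author's own statement) =====
-- stated objective: simpler
-- what changed: Replaced A's two sequential digit-consuming while loops with a nested dot-check between them by a single state-driven while loop that carries a seen_dot flag.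
import Mathlib
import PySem

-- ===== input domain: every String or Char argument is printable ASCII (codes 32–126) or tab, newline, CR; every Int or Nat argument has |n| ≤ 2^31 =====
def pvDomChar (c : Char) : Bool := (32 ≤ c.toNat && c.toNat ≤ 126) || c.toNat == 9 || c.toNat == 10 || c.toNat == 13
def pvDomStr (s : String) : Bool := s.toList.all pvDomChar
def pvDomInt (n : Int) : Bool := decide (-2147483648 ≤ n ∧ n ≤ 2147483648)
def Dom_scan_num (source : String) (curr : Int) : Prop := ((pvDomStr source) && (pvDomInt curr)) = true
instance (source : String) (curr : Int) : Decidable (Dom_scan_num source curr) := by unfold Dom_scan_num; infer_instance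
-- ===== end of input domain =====

-- B replaces A's two sequential digit loops and nested dot-check with one while loop driven
-- by a seen_dot flag (different decomposition; same cost).  Where Python A raises
-- (IndexError / ValueError, excluded by Pre_) the ports return the current index instead.

-- ===== PORT A =====
-- the list literal ['0',…,'9'] of A
def pvDigitsA : List Char := ['0', '1', '2', '3', '4', '5', '6', '7', '8', '9']

-- first while loop of A: consume digits
def pvLoop1 (s : List Char) (curr : Int) : Int :=
  if curr < (s.length : Int) - 1 then
    match PySem.List.pyGet? s (curr + 1) with
    | some c => if c ∈ pvDigitsA then pvLoop1 s (curr + 1) else curr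
    | none => curr            -- IndexError (excluded by Pre_)
  else curr
termination_by ((s.length : Int) - 1 - curr).toNat
decreasing_by omega

-- second while loop of A: consume digits after the dot; '.' branch is `raise` (excluded by Pre_)
def pvLoop2 (s : List Char) (curr : Int) : Int :=
  if curr < (s.length : Int) - 1 then
    match PySem.List.pyGet? s (curr + 1) with
    | some c =>
      if c ∈ pvDigitsA then pvLoop2 s (curr + 1)
      else if c = '.' then curr   -- raise ValueError (excluded by Pre_)
      else curr                   -- `return curr`
    | none => curr                -- IndexError (excluded by Pre_)
  else curr
termination_by ((s.length : Int) - 1 - curr).toNat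
decreasing_by omega

def scan_num (source : String) (curr : Int) : Int :=
  let s := source.toList
  let c1 := pvLoop1 s curr
  if c1 < (s.length : Int) - 1 then
    match PySem.List.pyGet? s (c1 + 1) with
    | some c => if c = '.' then pvLoop2 s (c1 + 1) else c1
    | none => c1                  -- IndexError (excluded by Pre_)
  else c1

-- ===== PORT B =====
-- B's single while loop with the seen_dot flag
def pvLoopB (s : List Char) (curr : Int) (seenDot : Bool) : Int :=
  if curr < (s.length : Int) - 1 then
    match PySem.List.pyGet? s (curr + 1) with
    | some nxt =>
      if nxt ∈ ("0123456789".toList) then pvLoopB s (curr + 1) seenDot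
      else if nxt = '.' && !seenDot then pvLoopB s (curr + 1) true
      else if nxt = '.' then curr  -- raise ValueError (excluded by Pre_)
      else curr                    -- break
    | none => curr                 -- IndexError (excluded by Pre_)
  else curr
termination_by ((s.length : Int) - 1 - curr).toNat
decreasing_by all_goals omega

def scan_num_alt (source : String) (curr : Int) : Int :=
  pvLoopB source.toList curr false

-- ===== PRECONDITION & SPEC =====
-- Pre_ excludes exactly the inputs on which Python A raises: an out-of-range read
-- (IndexError, curr + 1 below -len while the loop guard holds) and a number with two
-- decimal points (ValueError); A returns no value there, so nothing is claimed.
def pvTwoDot (s : List Char) (curr : Int) : Prop :=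
  ∃ d2 ∈ List.range (min ((s.length : Int) - 1 - curr).toNat (2 * s.length + 2)),
    ∃ d1 ∈ List.range d2,
      PySem.List.pyGet? s (curr + 1 + (d1 : Int)) = some '.' ∧
      PySem.List.pyGet? s (curr + 1 + (d2 : Int)) = some '.' ∧
      ∀ d ∈ List.range d2, d ≠ d1 →
        ∃ c ∈ pvDigitsA, PySem.List.pyGet? s (curr + 1 + (d : Int)) = some c

def Pre_scan_num (source : String) (curr : Int) : Prop :=
  (curr < (source.toList.length : Int) - 1 → 0 ≤ curr + 1 + (source.toList.length : Int)) ∧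
  ¬ pvTwoDot source.toList curr

instance (source : String) (curr : Int) : Decidable (Pre_scan_num source curr) := by
  unfold Pre_scan_num pvTwoDot; infer_instance

def pvWitness_scan_num : String × Int := ("12.5x", -1)

def Spec_scan_num (source : String) (curr : Int) (out : Int) : Prop := out = scan_num_alt source curr
instance (source : String) (curr : Int) (out : Int) : Decidable (Spec_scan_num source curr out) := by unfold Spec_scan_num; infer_instance

-- ===== CLAIM (what is proved, stated in full; the proofs are below) =====
def Claim_equal_scan_num : Prop := ∀ (source : String) (curr : Int), Dom_scan_num source curr → Pre_scan_num source curr → Spec_scan_num source curr (scan_num source curr)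

-- ===== LEMMAS AND PROOFS =====

theorem pvDigits_eq : ("0123456789".toList) = pvDigitsA := by decide

-- with seen_dot already true, B's loop computes exactly A's second loop
theorem pvLoopB_true (s : List Char) (curr : Int) :
    pvLoopB s curr true = pvLoop2 s curr := by
  rw [pvLoopB, pvLoop2]
  split
  · cases h : PySem.List.pyGet? s (curr + 1) with
    | none => rfl
    | some c =>
      simp only [pvDigits_eq]
      split
      · exact pvLoopB_true s (curr + 1)
      · simp
  · rfl
termination_by ((s.length : Int) - 1 - curr).toNat
decreasing_by omega

-- with seen_dot false, B's loop computes A's composition of loop1, dot-check and loop2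
theorem pvLoopB_false (s : List Char) (curr : Int) :
    pvLoopB s curr false =
      (let c1 := pvLoop1 s curr
       if c1 < (s.length : Int) - 1 then
         match PySem.List.pyGet? s (c1 + 1) with
         | some c => if c = '.' then pvLoop2 s (c1 + 1) else c1
         | none => c1
       else c1) := by
  rw [pvLoopB, pvLoop1]
  by_cases hg : curr < (s.length : Int) - 1
  · simp only [if_pos hg]
    cases h : PySem.List.pyGet? s (curr + 1) with
    | none => simp [h, hg]
    | some c =>
      simp only [pvDigits_eq]
      by_cases hd : c ∈ pvDigitsA
      · simp only [hd, if_pos]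
        exact pvLoopB_false s (curr + 1)
      · simp only [hd, if_false, Bool.not_false, Bool.and_true]
        by_cases hdot : c = '.'
        · simp [hdot, h, hg, pvLoopB_true]
        · simp [hdot, h, hg]
  · simp [hg]
termination_by ((s.length : Int) - 1 - curr).toNat
decreasing_by omega

-- ===== VERDICT (by name: the statement is the Claim_ definition above) =====
theorem scan_num_spec : Claim_equal_scan_num := by
  intro source curr _ _
  unfold Spec_scan_num scan_num scan_num_alt
  exact (pvLoopB_false source.toList curr).symm
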